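-- pv_equiv track=rewrite | github.com/alpha3002025/daily-codingtest | programmers/dfs-backtracking/lv2-괄호-변환/solution-20251217-1.py | solution
-- ===== SOURCE A (Python) =====
-- def split_uv(p):
--     count_l = 0
--     count_r = 0
--     for i in range(len(p)):
--         if p[i] == '(':
--             count_l += 1
--         else:
--             count_r += 1
--
--         if count_l == count_r:
--             return p[:i+1], p[i+1:]
--     return p,""
--
-- def reverse_bracket(s):
--     table = str.maketrans("()", ")(")
--     return s.translate(table)
--
-- def is_correct(s):
--     stack = []
--     for c in s:
--         if c == "(":
--             stack.append(c)
--         else: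
--             if not stack:
--                 return False
--             stack.pop()
--     return len(stack) == 0
--
-- def solution(p):
--     ## 문제에 적혀있는 절차를 그대로 따라서 구현
--     ## 1. 빈문자열
--     if not p:
--         return ""
--
--     ## 2. u,v 분리
--     u,v = split_uv(p)
--
--     ## 3. u가 올바른 괄호 문자열일때
--     if is_correct(u):
--         return u + solution(v)
--
--     ## 4. u 가 올바른 문자열이 아닐 경우
--     else:
--         answer = '('
--         answer += solution(v)
--         answer += ')'
--
--         ## u 의 첫번째문자, 마지막 문자를 제거한 안쪽 문자
--         u = u[1:-1]
--         ## 해당 문자열에 대해 괄호 방향 뒤집기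
--         answer += reverse_bracket(u)
--         return answer
-- ===== SOURCE B (Python) =====
-- def reverse_bracket(s):
--     return "".join(")" if c == "(" else "(" if c == ")" else c for c in s)
--
-- def is_correct(s):
--     depth = 0
--     for c in s:
--         depth += 1 if c == "(" else -1
--         if depth < 0:
--             return False
--     return depth == 0
--
-- def solution(p):
--     # iterative: split p into balanced "primitives" in one scan,
--     # then fold them right-to-left into the answer
--     prims = []
--     cur = []
--     cnt = 0
--     for c in p:
--         cur.append(c)
--         cnt += 1 if c == "(" else -1
--         if cnt == 0:
--             prims.append("".join(cur))
--             cur = []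
--     if cur:
--         prims.append("".join(cur))
--     acc = ""
--     for u in reversed(prims):
--         if is_correct(u):
--             acc = u + acc
--         else:
--             acc = "(" + acc + ")" + reverse_bracket(u[1:-1])
--     return acc
-- ===== Notes on version B (the rewrite author's own statement) =====
-- stated objective: alternative
-- what changed: Replaces A's recursive divide (split u/v, recurse on v) with a single left-to-right scan collecting all balanced primitives, followed by a right-to-left fold that assembles the answer; is_correct uses a depth counter instead of a stack.
import Mathlib
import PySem

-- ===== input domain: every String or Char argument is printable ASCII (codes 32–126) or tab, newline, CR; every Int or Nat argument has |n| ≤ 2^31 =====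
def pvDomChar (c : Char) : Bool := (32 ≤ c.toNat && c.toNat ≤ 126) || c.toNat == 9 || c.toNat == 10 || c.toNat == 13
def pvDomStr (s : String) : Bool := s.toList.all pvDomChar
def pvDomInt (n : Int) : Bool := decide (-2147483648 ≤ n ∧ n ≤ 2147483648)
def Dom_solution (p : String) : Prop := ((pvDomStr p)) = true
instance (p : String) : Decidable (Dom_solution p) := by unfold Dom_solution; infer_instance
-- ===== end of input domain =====

-- B replaces A's recursive divide (split u,v and recurse on v) by one scan that
-- collects all balanced primitives followed by a right-to-left fold (objective: alternative).

-- ===== PORT A =====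
-- split_uv: walk the string keeping '(' and ')' counts, cut at the first index where they equalize;
-- acc holds the consumed prefix reversed (p[:i+1] / p[i+1:] realized structurally)
def splitUVAux : List Char → Nat → Nat → List Char → List Char × List Char
  | [], _, _, acc => (acc.reverse, [])          -- fallback: return p, ""
  | c :: rest, cl, cr, acc =>
    if (if c = '(' then cl + 1 else cl) = (if c = '(' then cr else cr + 1)
    then ((c :: acc).reverse, rest)
    else splitUVAux rest (if c = '(' then cl + 1 else cl) (if c = '(' then cr else cr + 1) (c :: acc)

def splitUV (p : List Char) : List Char × List Char := splitUVAux p 0 0 []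

-- s.translate(str.maketrans("()", ")(")): swap the two bracket characters, keep all others (exact)
def reverseBracketA (s : List Char) : List Char :=
  s.map (fun c => if c = '(' then ')' else if c = ')' then '(' else c)

-- is_correct: explicit stack
def isCorrectAux : List Char → List Char → Bool
  | [], stack => stack.isEmpty
  | c :: rest, stack =>
    if c = '(' then isCorrectAux rest (c :: stack)
    else match stack with
      | [] => false
      | _ :: st => isCorrectAux rest st

def isCorrectA (s : List Char) : Bool := isCorrectAux s []

-- termination facts for solA (cited by the port's decreasing_by)
theorem splitUVAux_snd_len : ∀ (p : List Char) (cl cr : Nat) (acc : List Char),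
    (splitUVAux p cl cr acc).2.length ≤ p.length := by
  intro p
  induction p with
  | nil => intro cl cr acc; simp [splitUVAux]
  | cons c rest ih =>
    intro cl cr acc
    by_cases hc : c = '(' <;>
      simp only [splitUVAux, hc, reduceIte] <;> split <;>
        first
          | exact le_trans (ih _ _ _) (Nat.le_succ _)
          | simp

theorem splitUV_snd_lt (p : List Char) (h : p ≠ []) : (splitUV p).2.length < p.length := by
  cases p with
  | nil => simp at h
  | cons c rest =>
    by_cases hc : c = '(' <;>
      simp only [splitUV, splitUVAux, hc, reduceIte] <;> split <;>
        first
          | exact Nat.lt_succ_of_le (splitUVAux_snd_len _ _ _ _)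
          | simp

-- solution over List Char; u[1:-1] is (u.drop 1).dropLast (exact: Python's [1:-1] on any length)
def solA (p : List Char) : List Char :=
  if h : p = [] then []
  else
    let uv := splitUV p
    if isCorrectA uv.1 then uv.1 ++ solA uv.2
    else '(' :: solA uv.2 ++ ')' :: reverseBracketA ((uv.1.drop 1).dropLast)
termination_by p.length
decreasing_by all_goals exact splitUV_snd_lt p h

def solution (p : String) : String := String.mk (solA p.toList)

-- ===== PORT B =====
def reverseBracketB (s : List Char) : List Char :=
  s.map (fun c => if c = '(' then ')' else if c = ')' then '(' else c)

-- is_correct via a depth counter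
def isCorrectB : List Char → Int → Bool
  | [], depth => depth == 0
  | c :: rest, depth =>
    if depth + (if c = '(' then 1 else -1) < 0 then false
    else isCorrectB rest (depth + (if c = '(' then 1 else -1))

-- one scan collecting the balanced primitives; cur is the current chunk reversed
def primsAux : List Char → Int → List Char → List (List Char)
  | [], _, cur => if cur = [] then [] else [cur.reverse]
  | c :: rest, cnt, cur =>
    if cnt + (if c = '(' then 1 else -1) = 0 then (c :: cur).reverse :: primsAux rest 0 []
    else primsAux rest (cnt + (if c = '(' then 1 else -1)) (c :: cur)

-- body of the right-to-left fold
def stepB (u acc : List Char) : List Char :=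
  if isCorrectB u 0 then u ++ acc
  else '(' :: acc ++ ')' :: reverseBracketB ((u.drop 1).dropLast)

def solution_alt (p : String) : String :=
  String.mk ((primsAux p.toList 0 []).foldr stepB [])

-- ===== PRECONDITION & SPEC =====
def Spec_solution (p : String) (out : String) : Prop := out = solution_alt p
instance (p : String) (out : String) : Decidable (Spec_solution p out) := by unfold Spec_solution; infer_instance

-- ===== CLAIM (what is proved, stated in full; the proofs are below) =====
def Claim_equal_solution : Prop := ∀ (p : String), Dom_solution p → Spec_solution p (solution p)

-- ===== LEMMAS AND PROOFS =====
theorem isCorrect_agree : ∀ (s stack : List Char),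
    isCorrectAux s stack = isCorrectB s (stack.length : Int) := by
  intro s
  induction s with
  | nil =>
    intro stack
    cases stack <;> simp [isCorrectAux, isCorrectB] <;> omega
  | cons c rest ih =>
    intro stack
    by_cases hc : c = '('
    · have h0 : ¬ ((stack.length : Int) + 1 < 0) := by omega
      simp only [isCorrectAux, isCorrectB, hc, reduceIte, h0, ite_false, ih]
      norm_cast
    · cases stack with
      | nil =>
        simp [isCorrectAux, isCorrectB, hc]
      | cons x st =>
        have h1 : ((x :: st).length : Int) + -1 = (st.length : Int) := by push_cast [List.length_cons]; ring
        simp only [isCorrectAux, isCorrectB, hc, reduceIte, h1, ih]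
        rw [if_neg (by push_cast; omega)]

theorem isCorrect_agree0 (u : List Char) : isCorrectA u = isCorrectB u 0 := by
  simpa using isCorrect_agree u []

theorem prims_split : ∀ (p : List Char) (cl cr : Nat) (cur : List Char),
    (cur ≠ [] ∨ p ≠ []) →
    primsAux p ((cl : Int) - cr) cur =
      (splitUVAux p cl cr cur).1 :: primsAux (splitUVAux p cl cr cur).2 0 [] := by
  intro p
  induction p with
  | nil =>
    intro cl cr cur h
    rcases h with h | h
    · simp [primsAux, splitUVAux, h]
    · simp at h
  | cons c rest ih =>
    intro cl cr cur _
    by_cases hc : c = '('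
    · subst hc
      simp only [primsAux, splitUVAux, reduceIte]
      by_cases he : cl + 1 = cr
      · rw [if_pos (by omega), if_pos he]
      · rw [if_neg (by omega), if_neg he]
        have := ih (cl + 1) cr ('(' :: cur) (Or.inl (by simp))
        rw [show ((cl : Int) - cr + 1) = ((cl + 1 : Nat) : Int) - cr by push_cast; ring]
        exact this
    · simp only [primsAux, splitUVAux, hc, reduceIte]
      by_cases he : cl = cr + 1
      · rw [if_pos (by omega), if_pos he]
      · rw [if_neg (by omega), if_neg he]
        have := ih cl (cr + 1) (c :: cur) (Or.inl (by simp))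
        rw [show ((cl : Int) - cr + -1) = ((cl : Int)) - ((cr + 1 : Nat) : Int) by push_cast; ring]
        exact this

theorem prims_split0 (p : List Char) (h : p ≠ []) :
    primsAux p 0 [] = (splitUV p).1 :: primsAux (splitUV p).2 0 [] := by
  have := prims_split p 0 0 [] (Or.inr h)
  simpa [splitUV] using this

theorem revB_eq_revA (s : List Char) : reverseBracketB s = reverseBracketA s := rfl

theorem foldB_eq_solA : ∀ (n : Nat) (p : List Char), p.length ≤ n →
    (primsAux p 0 []).foldr stepB [] = solA p := by
  intro n
  induction n with
  | zero =>
    intro p hp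
    have : p = [] := List.eq_nil_of_length_eq_zero (Nat.le_zero.mp hp)
    subst this
    simp [primsAux, solA]
  | succ n ih =>
    intro p hp
    by_cases h : p = []
    · subst h; simp [primsAux, solA]
    · rw [prims_split0 p h]
      have hv : (splitUV p).2.length ≤ n := by
        have := splitUV_snd_lt p h
        omega
      rw [List.foldr_cons, ih _ hv]
      conv_rhs => rw [solA]
      rw [dif_neg h]
      simp only [stepB, ← isCorrect_agree0, revB_eq_revA]

theorem solution_eq (p : String) : solution p = solution_alt p := by
  unfold solution solution_alt
  rw [foldB_eq_solA p.toList.length p.toList le_rfl]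

-- ===== VERDICT (by name: the statement is the Claim_ definition above) =====
theorem solution_spec : Claim_equal_solution := by
  intro p _
  unfold Spec_solution
  exact solution_eq p
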